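-- pv_equiv track=rewrite | github.com/LikeCafelatte/Practice | Algorithm study/Binary search/Roll_cake_cutting.py | solution
-- ===== SOURCE A (Python) =====
-- def solution(topping):
--     answer = 0
--     low, high, mid = 0, len(topping) - 1, 0
--     while high > low:
--         mid = (low + high) // 2
--         if len(set(topping[:mid])) < len(set(topping[mid:])):
--             low = mid + 1
--         else:
--             high = mid
--     answer = low
--     high = len(topping) - 1
--     while high > low:
--         mid = (low + high) // 2
--         if len(set(topping[:mid])) <= len(set(topping[mid:])):
--             low = mid + 1
--         else:
--             high = mid
--
--     return high - answer
-- ===== SOURCE B (Python) =====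
-- def solution(topping):
--     # One linear pass from the right for suffix distinct counts, then one
--     # linear pass from the left comparing the running prefix distinct count
--     # against the suffix distinct count at each cut.
--     suffix_distinct = []
--     seen = set()
--     for x in reversed(topping):
--         seen.add(x)
--         suffix_distinct.append(len(seen))
--     suffix_distinct.reverse()
--     seen = set()
--     answer = 0
--     for x, s in zip(topping, suffix_distinct[:-1]):
--         if len(seen) == s:
--             answer += 1
--         seen.add(x)
--     return answer
-- ===== Notes on version B (the rewrite author's own statement) =====
-- stated objective: faster
-- what changed: Replaces the two binary searches (each step rebuilding set(topping[:mid]) and set(topping[mid:]) from scratch) by two linear passes: suffix distinct counts from the right, then one forward pass comparing the running prefix distinct count at each cut.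
-- intended difference: On the empty list A returns -1 (an artefact of its len(topping)-1 binary-search bounds), while B returns 0, the intended number of cut positions of an empty cake. — e.g. on solution([]): A returns -1, B returns 0
import Mathlib
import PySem

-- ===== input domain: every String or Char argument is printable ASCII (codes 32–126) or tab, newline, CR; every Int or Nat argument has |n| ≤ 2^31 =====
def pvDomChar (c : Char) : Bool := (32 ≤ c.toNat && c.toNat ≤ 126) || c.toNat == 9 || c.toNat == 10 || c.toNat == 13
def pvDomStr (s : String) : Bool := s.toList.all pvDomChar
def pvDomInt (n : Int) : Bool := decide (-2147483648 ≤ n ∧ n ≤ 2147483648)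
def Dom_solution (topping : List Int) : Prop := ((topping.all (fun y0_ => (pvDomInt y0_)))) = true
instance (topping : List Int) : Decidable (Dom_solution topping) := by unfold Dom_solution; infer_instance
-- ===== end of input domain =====

-- B replaces A's two binary searches (each step rebuilding both slice sets) by two linear passes;
-- objective: faster.

-- ===== PORT A =====
-- A's two while-loops are textually identical except for `<` vs `<=`; they are ported as one helper
-- with a `strict` flag.  The loop runs on fuel = (high - low).toNat, which bounds the iteration
-- count (each iteration strictly shrinks high - low), so the fuel only makes the recursion total
-- and never cuts an iteration; the exit state (low, high) is returned.
def solLoop (topping : List Int) (strict : Bool) : Nat → Int → Int → Int × Int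
  | 0, low, high => (low, high)
  | fuel + 1, low, high =>
    if high > low then
      let mid := PySem.Int.floordiv (low + high) 2
      let a := (PySem.Set.ofList (PySem.List.slice topping none (some mid))).length
      let b := (PySem.Set.ofList (PySem.List.slice topping (some mid) none)).length
      if (if strict then decide (a < b) else decide (a ≤ b)) then
        solLoop topping strict fuel (mid + 1) high
      else
        solLoop topping strict fuel low mid
    else (low, high)

def solution (topping : List Int) : Int :=
  let low : Int := 0
  let high : Int := (topping.length : Int) - 1
  let r1 := solLoop topping true (high - low).toNat low high
  let answer := r1.1
  let high2 : Int := (topping.length : Int) - 1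
  let r2 := solLoop topping false (high2 - answer).toNat answer high2
  r2.2 - answer

-- ===== PORT B =====
def solution_alt (topping : List Int) : Int :=
  let p1 := topping.reverse.foldl
      (fun (st : PySem.Set Int × List Int) x =>
        let seen := PySem.Set.add st.1 x
        (seen, st.2 ++ [(seen.length : Int)]))
      ((PySem.Set.empty : PySem.Set Int), ([] : List Int))
  let suffixDistinct := p1.2.reverse
  let p2 := (topping.zip (PySem.List.slice suffixDistinct none (some (-1)))).foldl
      (fun (st : PySem.Set Int × Int) xs =>
        let cnt := if (st.1.length : Int) == xs.2 then st.2 + 1 else st.2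
        (PySem.Set.add st.1 xs.1, cnt))
      ((PySem.Set.empty : PySem.Set Int), (0 : Int))
  p2.2

-- ===== PRECONDITION & SPEC =====
-- On the empty list A returns -1 (an artefact of its len(topping)-1 binary-search bounds),
-- while B returns 0, the intended number of cut positions of an empty cake.
def D_solution (topping : List Int) : Prop := topping = []
instance (topping : List Int) : Decidable (D_solution topping) := by unfold D_solution; infer_instance
def Spec_solution (topping : List Int) (out : Int) : Prop := ¬ D_solution topping → out = solution_alt topping
instance (topping : List Int) (out : Int) : Decidable (Spec_solution topping out) := by unfold Spec_solution; infer_instance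
def pvDiffWitness_solution : List Int := []
def pvDiffWitnessOut_solution : Int × Int := (-1, 0)

-- ===== CLAIM (what is proved, stated in full; the proofs are below) =====
def Claim_unchanged_solution : Prop := ∀ (topping : List Int), Dom_solution topping → Spec_solution topping (solution topping)
def Claim_changed_solution : Prop := Dom_solution (pvDiffWitness_solution) ∧ D_solution (pvDiffWitness_solution) ∧ solution (pvDiffWitness_solution) = pvDiffWitnessOut_solution.1 ∧ solution_alt (pvDiffWitness_solution) = pvDiffWitnessOut_solution.2 ∧ pvDiffWitnessOut_solution.1 ≠ pvDiffWitnessOut_solution.2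
def Claim_exact_solution : Prop := ∀ (topping : List Int), Dom_solution topping → D_solution topping → solution topping ≠ solution_alt topping

-- ===== LEMMAS AND PROOFS =====

-- distinct count of the prefix topping[:m] resp. suffix topping[m:]
def Fc (t : List Int) (m : Nat) : Nat := (t.take m).toFinset.card
def Gc (t : List Int) (m : Nat) : Nat := (t.drop m).toFinset.card
-- the "go right" test of A's loop with flag `strict`
def goB (t : List Int) (strict : Bool) (m : Nat) : Bool :=
  if strict then decide (Fc t m < Gc t m) else decide (Fc t m ≤ Gc t m)

lemma setlen (l : List Int) : (PySem.Set.ofList l).length = l.toFinset.card := by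
  have hn : (PySem.Set.ofList l).Nodup := PySem.Set.nodup_ofList l
  have he : (PySem.Set.ofList l).toFinset = l.toFinset := by
    ext x; simp [List.mem_toFinset, PySem.Set.mem_ofList]
  rw [← List.toFinset_card_of_nodup hn, he]

lemma Fc_mono (t : List Int) {i j : Nat} (h : i ≤ j) : Fc t i ≤ Fc t j := by
  apply Finset.card_le_card
  intro x hx
  rw [List.mem_toFinset] at *
  have hij : t.take i = (t.take j).take i := by rw [List.take_take]; congr 1; omega
  exact List.take_subset _ _ (hij ▸ hx)

lemma Gc_anti (t : List Int) {i j : Nat} (h : i ≤ j) : Gc t j ≤ Gc t i := by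
  apply Finset.card_le_card
  intro x hx
  rw [List.mem_toFinset] at *
  have hij : t.drop j = (t.drop i).drop (j - i) := by rw [List.drop_drop]; congr 1; omega
  exact List.drop_subset _ _ (hij ▸ hx)

lemma goB_down (t : List Int) (s : Bool) {i j : Nat} (h : i ≤ j) (hj : goB t s j = true) :
    goB t s i = true := by
  have hf := Fc_mono t h
  have hg := Gc_anti t h
  cases s <;> simp [goB] at hj ⊢ <;> omega

lemma cond_eq (t : List Int) (s : Bool) (m : Int) (h : 0 ≤ m) :
    (if s then decide ((PySem.Set.ofList (PySem.List.slice t none (some m))).length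
                        < (PySem.Set.ofList (PySem.List.slice t (some m) none)).length)
     else decide ((PySem.Set.ofList (PySem.List.slice t none (some m))).length
                        ≤ (PySem.Set.ofList (PySem.List.slice t (some m) none)).length))
      = goB t s m.toNat := by
  rw [PySem.List.slice_to t h, PySem.List.slice_from t h, setlen, setlen]
  cases s <;> simp [goB, Fc, Gc]

lemma solLoop_eq (t : List Int) (s : Bool) :
    ∀ (fuel : Nat) (low high : Int), 0 ≤ low → low ≤ high → (high - low).toNat ≤ fuel →
    solLoop t s fuel low high =
      (low + (((PySem.List.pyRange low high 1).countP (fun m => goB t s m.toNat) : Nat) : Int),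
       low + (((PySem.List.pyRange low high 1).countP (fun m => goB t s m.toNat) : Nat) : Int)) := by
  intro fuel
  induction fuel with
  | zero =>
    intro low high h0 hlh hf
    have : high = low := by omega
    subst this
    simp [solLoop, PySem.List.pyRange_one_eq_nil (le_refl _)]
  | succ fuel ih =>
    intro low high h0 hlh hf
    by_cases hlt : low < high
    · have hmid : low ≤ PySem.Int.floordiv (low + high) 2
          ∧ PySem.Int.floordiv (low + high) 2 < high := by
        constructor
        · rw [PySem.Int.le_floordiv_iff_mul_le (by omega : (0:Int) < 2)]; omega
        · rw [PySem.Int.floordiv_lt_iff_lt_mul (by omega : (0:Int) < 2)]; omega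
      set mid := PySem.Int.floordiv (low + high) 2 with hmiddef
      have hm0 : 0 ≤ mid := by omega
      simp only [solLoop, if_pos hlt]
      rw [cond_eq t s mid hm0]
      by_cases hc : goB t s mid.toNat = true
      · rw [if_pos hc, ih (mid + 1) high (by omega) (by omega) (by omega)]
        have hsplit : PySem.List.pyRange low high 1
            = PySem.List.pyRange low (mid + 1) 1 ++ PySem.List.pyRange (mid + 1) high 1 :=
          PySem.List.pyRange_one_append low (mid + 1) high (by omega) (by omega)
        rw [hsplit, List.countP_append]
        have hall : (PySem.List.pyRange low (mid + 1) 1).countP (fun m => goB t s m.toNat)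
            = (mid + 1 - low).toNat := by
          rw [List.countP_eq_length.mpr, PySem.List.length_pyRange_one]
          intro x hx
          have hb := PySem.List.mem_pyRange_one.mp hx
          exact goB_down t s (by omega : x.toNat ≤ mid.toNat) hc
        rw [hall]
        refine Prod.ext ?_ ?_ <;> push_cast <;> omega
      · rw [if_neg hc, ih low mid (by omega) (by omega) (by omega)]
        have hsplit : PySem.List.pyRange low high 1
            = PySem.List.pyRange low mid 1 ++ PySem.List.pyRange mid high 1 :=
          PySem.List.pyRange_one_append low mid high (by omega) (by omega)
        rw [hsplit, List.countP_append]
        have hzero : (PySem.List.pyRange mid high 1).countP (fun m => goB t s m.toNat) = 0 := by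
          rw [List.countP_eq_zero]
          intro x hx
          have hb := PySem.List.mem_pyRange_one.mp hx
          intro hgx
          exact hc (goB_down t s (by omega : mid.toNat ≤ x.toNat) hgx)
        rw [hzero]
        refine Prod.ext ?_ ?_ <;> push_cast <;> omega
    · have : high = low := by omega
      subst this
      simp [solLoop, PySem.List.pyRange_one_eq_nil (le_refl _)]

lemma count_char (p : Nat → Bool) (hdc : ∀ i j, i ≤ j → p j = true → p i = true) :
    ∀ (b k : Nat), k < b → (p k = true ↔ k < (List.range b).countP p) := by
  intro b
  induction b with
  | zero => intro k hk; omega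
  | succ n ih =>
    intro k hk
    rw [List.range_succ, List.countP_append]
    by_cases hp : p n = true
    · have hall : (List.range n).countP p = n := by
        rw [List.countP_eq_length.mpr, List.length_range]
        intro x hx
        exact hdc x n (le_of_lt (List.mem_range.mp hx)) hp
      simp [hall, hp]
      constructor
      · intro; omega
      · intro _; exact hdc k n (by omega) hp
    · have hc : (List.range n).countP p ≤ n := by
        have := List.countP_le_length (p := p) (l := List.range n)
        simpa using this
      simp [hp]
      rcases Nat.lt_or_ge k n with h | h
      · exact ih k h
      · have hkn : k = n := by omega
        subst hkn
        simp [hp]; omega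

lemma count_ltc (c m : Nat) :
    (List.range m).countP (fun k => decide (k < c)) = min c m := by
  induction m with
  | zero => simp
  | succ m ih =>
    rw [List.range_succ, List.countP_append, ih]
    by_cases h : m < c <;> simp [h] <;> omega

lemma pyCount (p : Nat → Bool) (a b : Int) (ha : 0 ≤ a) :
    (PySem.List.pyRange a b 1).countP (fun m => p m.toNat)
      = (List.range (b - a).toNat).countP (fun k => p (a.toNat + k)) := by
  rw [PySem.List.pyRange_one, List.countP_map]
  apply List.countP_congr
  intro k _
  have : (a + (k : Int)).toNat = a.toNat + k := by omega
  simp [Function.comp, this]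

-- counting E minus Λ through the pointwise split "≤ is < or ="
lemma countP_le_split (l : List Nat) (f g : Nat → Nat) :
    l.countP (fun k => decide (f k ≤ g k))
      = l.countP (fun k => decide (f k < g k)) + l.countP (fun k => decide (f k = g k)) := by
  induction l with
  | nil => simp
  | cons a l ih =>
    simp only [List.countP_cons, ih]
    by_cases h2 : f a = g a
    · simp [h2]
      omega
    · by_cases h1 : f a < g a
      · have hle : f a ≤ g a := by omega
        simp [h1, h2, hle]
        omega
      · have hle : ¬ f a ≤ g a := by omega
        simp [h1, h2, hle]

lemma revFold (l : List Int) : ∀ (s : PySem.Set Int) (acc : List Int),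
    l.foldl (fun (st : PySem.Set Int × List Int) x =>
        let seen := PySem.Set.add st.1 x
        (seen, st.2 ++ [(seen.length : Int)])) (s, acc)
    = (PySem.Set.update s l,
       acc ++ (List.range l.length).map (fun k => ((PySem.Set.update s (l.take (k+1))).length : Int))) := by
  induction l with
  | nil => intro s acc; simp [PySem.Set.update]
  | cons x r ih =>
    intro s acc
    simp only [List.foldl_cons]
    rw [ih]
    have h1 : ∀ w, PySem.Set.update s (x :: w) = PySem.Set.update (PySem.Set.add s x) w := by
      intro w; simp [PySem.Set.update]
    refine Prod.ext ?_ ?_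
    · simp [h1]
    · show acc ++ [((PySem.Set.add s x).length : Int)] ++ _ = _
      rw [List.length_cons, List.range_succ_eq_map, List.map_cons, List.map_map]
      simp only [List.take_succ_cons, h1]
      have h0 : PySem.Set.update (PySem.Set.add s x) (List.take 0 r) = PySem.Set.add s x := by
        simp [PySem.Set.update]
      simp [Function.comp, List.append_assoc]

lemma suf_eq (t : List Int) :
    ((List.range t.reverse.length).map
        (fun k => ((PySem.Set.update PySem.Set.empty (t.reverse.take (k+1))).length : Int))).reverse
      = (List.range t.length).map (fun m => (Gc t m : Int)) := by
  have hup : ∀ l : List Int, PySem.Set.update PySem.Set.empty l = PySem.Set.ofList l := fun _ => rfl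
  apply List.ext_getElem
  · simp
  · intro i h1 h2
    simp only [List.length_reverse, List.length_map, List.length_range] at h1 h2
    rw [List.getElem_reverse]
    simp only [List.length_map, List.length_range, List.getElem_map, List.getElem_range]
    rw [hup, setlen]
    have hlen : t.reverse.length = t.length := List.length_reverse
    have hn : i < t.length := by simpa [hlen] using h2
    have harg : t.reverse.length - 1 - i + 1 = t.length - i := by omega
    rw [harg]
    have htr : t.reverse.take (t.length - i) = (t.drop (t.length - (t.length - i))).reverse :=
      List.take_reverse
    have : t.length - (t.length - i) = i := by omega
    rw [htr, this, List.toFinset_reverse]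
    rfl

-- the running count of B's forward pass, as a recursion over the zipped list
-- (the set is the state BEFORE the current element is added, as in B's loop)
def cnt2 (s : PySem.Set Int) : List (Int × Int) → Nat
  | [] => 0
  | (x, v) :: r =>
    (if (s.length : Int) = v then 1 else 0) + cnt2 (PySem.Set.add s x) r

lemma zipFold2 (l : List (Int × Int)) : ∀ (s : PySem.Set Int) (c : Int),
    l.foldl (fun (st : PySem.Set Int × Int) xs =>
        let cnt := if (st.1.length : Int) == xs.2 then st.2 + 1 else st.2
        (PySem.Set.add st.1 xs.1, cnt)) (s, c)
    = (PySem.Set.update s (l.map Prod.fst), c + ((cnt2 s l : Nat) : Int)) := by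
  induction l with
  | nil => intro s c; simp [cnt2, PySem.Set.update]
  | cons xv r ih =>
    rcases xv with ⟨x, v⟩
    intro s c
    simp only [List.foldl_cons]
    rw [ih]
    have hupd : PySem.Set.update s (x :: r.map Prod.fst)
        = PySem.Set.update (PySem.Set.add s x) (r.map Prod.fst) := by simp [PySem.Set.update]
    refine Prod.ext ?_ ?_
    · simp [hupd]
    · simp only [cnt2, beq_iff_eq]
      split_ifs <;> push_cast <;> ring

lemma cnt2_eq (u : List Int) : ∀ (vs : List Int) (s : PySem.Set Int),
    cnt2 s (u.zip vs) =
      (List.range (min u.length vs.length)).countP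
          (fun k => decide (((PySem.Set.update s (u.take k)).length : Int) = vs.getD k 0)) := by
  induction u with
  | nil => intro vs s; simp [cnt2]
  | cons x u' ih =>
    intro vs s
    cases vs with
    | nil => simp [cnt2]
    | cons v vs' =>
      simp only [List.zip_cons_cons, cnt2, ih]
      have hmin : min (x :: u').length (v :: vs').length = min u'.length vs'.length + 1 := by
        simp [List.length_cons]
      rw [hmin, List.range_succ_eq_map]
      have hsucc : ∀ w, PySem.Set.update s (x :: w) = PySem.Set.update (PySem.Set.add s x) w := by
        intro w; simp [PySem.Set.update]
      have h0 : PySem.Set.update s ((x :: u').take 0) = s := rfl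
      simp only [List.countP_cons, List.countP_map]
      have hcong : (List.range (min u'.length vs'.length)).countP
            ((fun k => decide (((PySem.Set.update s ((x :: u').take k)).length : Int)
                = ((v :: vs').getD k 0))) ∘ Nat.succ)
          = (List.range (min u'.length vs'.length)).countP
            (fun k => decide (((PySem.Set.update (PySem.Set.add s x) (u'.take k)).length : Int)
                = vs'.getD k 0)) := by
        apply List.countP_congr
        intro k _
        simp [Function.comp, List.take_succ_cons, hsucc]
      rw [hcong]
      simp only [List.getD_cons_zero, h0, decide_eq_true_eq]
      split_ifs <;> omega

-- characterisation of B's value: the number of cut positions m < n-1 with Fc m = Gc m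
lemma B_char (t : List Int) :
    solution_alt t
      = (((List.range (t.length - 1)).countP (fun k => decide (Fc t k = Gc t k)) : Nat) : Int) := by
  simp only [solution_alt]
  rw [revFold]
  simp only [List.nil_append]
  rw [suf_eq, PySem.List.slice_to_neg_one, zipFold2]
  simp only []
  rw [cnt2_eq]
  by_cases ht : t = []
  · subst ht; simp
  · have hN : 1 ≤ t.length := List.length_pos_of_ne_nil ht
    obtain ⟨n, hn⟩ : ∃ n, t.length = n + 1 := ⟨t.length - 1, by omega⟩
    have hdrop : ((List.range t.length).map (fun m => (Gc t m : Int))).dropLast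
        = (List.range (t.length - 1)).map (fun m => (Gc t m : Int)) := by
      rw [hn, List.range_succ, List.map_append]
      simp
    rw [hdrop]
    have hmin : min t.length ((List.range (t.length - 1)).map (fun m => (Gc t m : Int))).length
        = t.length - 1 := by
      rw [List.length_map, List.length_range]; omega
    rw [hmin]
    have hup : ∀ l : List Int, PySem.Set.update PySem.Set.empty l = PySem.Set.ofList l :=
      fun _ => rfl
    rw [zero_add]
    congr 1
    apply List.countP_congr
    intro k hk
    have hkN : k < t.length - 1 := List.mem_range.mp hk
    have hgetD : ((List.range (t.length - 1)).map (fun m => (Gc t m : Int))).getD k 0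
        = (Gc t k : Int) := by
      simp [List.getD, hkN]
    rw [hup, setlen, hgetD]
    simp [Fc]

-- characterisation of A's value on a nonempty list, via Λ and E
lemma A_char (t : List Int) (hne : t ≠ []) :
    solution t =
      ((min ((List.range t.length).countP (goB t false)) (t.length - 1) : Nat) : Int)
        - ((min ((List.range t.length).countP (goB t true)) (t.length - 1) : Nat) : Int) := by
  have hdc1 : ∀ i j, i ≤ j → goB t true j = true → goB t true i = true :=
    fun _ _ hij hj => goB_down t true hij hj
  have hdc2 : ∀ i j, i ≤ j → goB t false j = true → goB t false i = true :=
    fun _ _ hij hj => goB_down t false hij hj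
  set Λ := (List.range t.length).countP (goB t true) with hLdef
  set E := (List.range t.length).countP (goB t false) with hEdef
  have hLE : Λ ≤ E := by
    apply List.countP_mono_left
    intro x _ hx
    have h1 : Fc t x < Gc t x := by simpa [goB] using hx
    simp only [goB]
    simpa using le_of_lt h1
  have hEN : E ≤ t.length := by
    have := List.countP_le_length (p := goB t false) (l := List.range t.length)
    simpa using this
  have hN : 1 ≤ t.length := List.length_pos_of_ne_nil hne
  have hchar2 : ∀ k, k < t.length → (goB t false k = true ↔ k < E) :=
    fun k hk => count_char (goB t false) hdc2 t.length k hk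
  set Ln := min Λ (t.length - 1) with hLndef
  have hLn : Ln ≤ t.length - 1 := min_le_right _ _
  have hc1 : ((PySem.List.pyRange 0 ((t.length : Int) - 1) 1).countP (fun m => goB t true m.toNat)) = Ln := by
    rw [pyCount (goB t true) 0 ((t.length : Int) - 1) (le_refl 0)]
    have h1 : (((t.length : Int) - 1) - 0).toNat = t.length - 1 := by omega
    rw [h1, List.countP_congr (q := fun k => decide (k < Λ)) ?_, count_ltc]
    intro k hk
    have hkN : k < t.length := by have := List.mem_range.mp hk; omega
    simp only [Int.toNat_zero, Nat.zero_add, decide_eq_true_eq]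
    exact count_char (goB t true) hdc1 t.length k hkN
  have hc2 : ((PySem.List.pyRange (Ln : Int) ((t.length : Int) - 1) 1).countP (fun m => goB t false m.toNat))
      = min (E - Ln) ((t.length - 1) - Ln) := by
    rw [pyCount (goB t false) (Ln : Int) _ (by positivity)]
    have h1 : (((t.length : Int) - 1) - (Ln : Int)).toNat = (t.length - 1) - Ln := by omega
    rw [h1, List.countP_congr (q := fun k => decide (k < E - Ln)) ?_, count_ltc]
    intro k hk
    have hkb : k < (t.length - 1) - Ln := List.mem_range.mp hk
    have h2 : (Ln : Int).toNat = Ln := by omega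
    simp only [h2, decide_eq_true_eq]
    rw [hchar2 (Ln + k) (by omega)]
    omega
  have hA : solution t = ((min (E - Ln) ((t.length - 1) - Ln) : Nat) : Int) := by
    simp only [solution]
    rw [solLoop_eq t true _ 0 ((t.length : Int) - 1) (le_refl 0) (by omega) (le_refl _)]
    simp only [hc1, zero_add]
    rw [solLoop_eq t false _ (Ln : Int) ((t.length : Int) - 1) (by positivity) (by omega) (le_refl _)]
    simp only [hc2]
    omega
  rw [hA]
  omega

lemma notD_eq (t : List Int) (hD : ¬ D_solution t) : solution t = solution_alt t := by
  have hne : t ≠ [] := fun h => hD h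
  have hN : 1 ≤ t.length := List.length_pos_of_ne_nil hne
  rw [A_char t hne, B_char t]
  set Λ := (List.range t.length).countP (goB t true) with hLdef
  set E := (List.range t.length).countP (goB t false) with hEdef
  have hdc1 : ∀ i j, i ≤ j → goB t true j = true → goB t true i = true :=
    fun _ _ hij hj => goB_down t true hij hj
  have hdc2 : ∀ i j, i ≤ j → goB t false j = true → goB t false i = true :=
    fun _ _ hij hj => goB_down t false hij hj
  -- restricting either count to the n-1 first positions clamps it at n-1
  have hclamp : ∀ s : Bool, (List.range (t.length - 1)).countP (goB t s)
      = min ((List.range t.length).countP (goB t s)) (t.length - 1) := by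
    intro s
    rw [List.countP_congr
        (q := fun k => decide (k < (List.range t.length).countP (goB t s))) ?_, count_ltc]
    intro k hk
    have hkN : k < t.length - 1 := List.mem_range.mp hk
    simp only [decide_eq_true_eq]
    exact count_char (goB t s) (fun i j hij hj => goB_down t s hij hj) t.length k (by omega)
  -- split "≤" into "<" plus "=" on the first n-1 positions
  have hsplit : (List.range (t.length - 1)).countP (goB t false)
      = (List.range (t.length - 1)).countP (goB t true)
        + (List.range (t.length - 1)).countP (fun k => decide (Fc t k = Gc t k)) := by
    have h1 : ∀ s : Bool, (List.range (t.length - 1)).countP (goB t s)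
        = (List.range (t.length - 1)).countP
            (fun k => if s then decide (Fc t k < Gc t k) else decide (Fc t k ≤ Gc t k)) := by
      intro s; apply List.countP_congr; intro k _; simp [goB]
    rw [h1, h1]
    simpa using countP_le_split (List.range (t.length - 1)) (Fc t) (Gc t)
  rw [← hclamp true, ← hclamp false, hsplit]
  push_cast
  ring

-- ===== VERDICT (by name: the statement is the Claim_ definition above) =====
theorem solution_spec : Claim_unchanged_solution := by
  intro t _ hD
  exact notD_eq t hD

theorem solution_changed : Claim_changed_solution := by
  unfold Claim_changed_solution; decide

theorem solution_tight : Claim_exact_solution := by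
  unfold Claim_exact_solution
  intro t _ hD
  subst hD
  decide
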